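-- pv_equiv track=rewrite | github.com/idanwekhai/Advent_of_code_2021 | Day 7.py | calc_fuel_one
-- ===== SOURCE A (Python) =====
-- def calc_fuel_one(seq):
--     pos = max(seq,key=seq.count)
--     total_fuel = {}
--     for pos in range(0, len(seq)):
--         track_fuel = 0
--         for i in seq:
--             fuel = abs(i-pos)
--             track_fuel += fuel
--         total_fuel[pos] = track_fuel
--     return total_fuel
-- ===== SOURCE B (Python) =====
-- def calc_fuel_one(seq):
--     n = len(seq)
--     s = sorted(seq)
--     cur = 0
--     for x in s:
--         cur += abs(x)
--     total_fuel = {}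
--     j = 0
--     for pos in range(n):
--         total_fuel[pos] = cur
--         while j < n and s[j] <= pos:
--             j += 1
--         cur += j - (n - j)
--     return total_fuel
-- ===== Notes on version B (the rewrite author's own statement) =====
-- stated objective: faster
-- what changed: Instead of rescanning the whole list for every position, B sorts once and sweeps positions 0..n-1 maintaining the running abs-distance sum incrementally (cur += (#elems<=pos) - (#elems>pos)) with a monotone pointer into the sorted list.
import Mathlib
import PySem

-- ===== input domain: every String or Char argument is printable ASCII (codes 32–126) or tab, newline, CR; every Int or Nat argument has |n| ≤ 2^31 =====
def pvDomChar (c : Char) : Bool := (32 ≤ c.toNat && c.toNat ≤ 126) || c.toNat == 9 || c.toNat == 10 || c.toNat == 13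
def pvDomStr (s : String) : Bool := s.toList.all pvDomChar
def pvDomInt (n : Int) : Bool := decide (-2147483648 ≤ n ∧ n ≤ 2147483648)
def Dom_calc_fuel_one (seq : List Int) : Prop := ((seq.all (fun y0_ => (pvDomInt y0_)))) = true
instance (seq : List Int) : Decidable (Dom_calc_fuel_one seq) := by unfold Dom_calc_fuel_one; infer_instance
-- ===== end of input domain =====

-- B replaces A's per-position rescan of the whole list by one sort plus an incremental
-- sweep of the running abs-distance sum with a monotone pointer (objective: faster).

-- ===== PORT A =====
def calc_fuel_one (seq : List Int) : List (Int × Int) :=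
  -- pos = max(seq, key=seq.count)  (dead assignment; raises ValueError on [], excluded by Pre_)
  let _pos : Option Int := PySem.List.max? seq (fun x => PySem.List.count seq x)
  ((PySem.List.pyRange 0 (seq.length : Int) 1).foldl
    (fun total_fuel pos =>
      total_fuel.insert pos (seq.foldl (fun track_fuel i => track_fuel + |i - pos|) 0))
    (PySem.Dict.empty : PySem.Dict Int Int)).items

-- ===== PORT B =====
-- while j < n and s[j] <= pos: j += 1
def pvWhileAdv (s : List Int) (pos : Int) (j : Nat) : Nat :=
  if h : j < s.length then
    if s[j] ≤ pos then pvWhileAdv s pos (j + 1) else j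
  else j
termination_by s.length - j
decreasing_by omega

def calc_fuel_one_alt (seq : List Int) : List (Int × Int) :=
  let n : Int := (seq.length : Int)
  let s := PySem.List.sorted seq (fun x => x) false
  let cur0 : Int := s.foldl (fun cur x => cur + |x|) 0
  (((PySem.List.pyRange 0 n 1).foldl
    (fun st pos =>
      let j := pvWhileAdv s pos st.2.2
      (st.1.insert pos st.2.1, st.2.1 + (j : Int) - (n - (j : Int)), j))
    ((PySem.Dict.empty : PySem.Dict Int Int), cur0, 0)).1).items

-- ===== PRECONDITION & SPEC =====
-- Pre_ excludes only the empty list, on which Python A raises ValueError (max() of empty sequence).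
def Pre_calc_fuel_one (seq : List Int) : Prop := seq ≠ []
instance (seq : List Int) : Decidable (Pre_calc_fuel_one seq) := by unfold Pre_calc_fuel_one; infer_instance
def pvWitness_calc_fuel_one : List Int := [1, 2]

def Spec_calc_fuel_one (seq : List Int) (out : List (Int × Int)) : Prop := out = calc_fuel_one_alt seq
instance (seq : List Int) (out : List (Int × Int)) : Decidable (Spec_calc_fuel_one seq out) := by unfold Spec_calc_fuel_one; infer_instance

-- ===== CLAIM (what is proved, stated in full; the proofs are below) =====
def Claim_equal_calc_fuel_one : Prop := ∀ (seq : List Int), Dom_calc_fuel_one seq → Pre_calc_fuel_one seq → Spec_calc_fuel_one seq (calc_fuel_one seq)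

-- ===== LEMMAS AND PROOFS =====

/-- total abs distance of the elements of `S` to `p` -/
def pvG (S : List Int) (p : Int) : Int := (S.map (fun x => |x - p|)).sum

lemma pvFoldl_abs (p : Int) : ∀ (l : List Int) (c : Int),
    l.foldl (fun t i => t + |i - p|) c = c + pvG l p := by
  intro l
  induction l with
  | nil => intro c; simp [pvG]
  | cons a t ih => intro c; simp [pvG, List.foldl_cons, ih] at *; omega

lemma pvFoldl_abs0 : ∀ (l : List Int) (c : Int),
    l.foldl (fun cur x => cur + |x|) c = c + pvG l 0 := by
  intro l
  induction l with
  | nil => intro c; simp [pvG]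
  | cons a t ih => intro c; simp [pvG, List.foldl_cons, ih] at *; omega

lemma pvCountP_takeWhile (pos : Int) : ∀ (S : List Int), S.Pairwise (· ≤ ·) →
    S.countP (fun x => decide (x ≤ pos)) = (S.takeWhile (fun x => decide (x ≤ pos))).length := by
  intro S
  induction S with
  | nil => simp
  | cons a t ih =>
    intro hS
    rcases List.pairwise_cons.mp hS with ⟨ha, ht⟩
    by_cases h : a ≤ pos
    · simp [List.takeWhile_cons, h, ih ht, Nat.add_comm]
    · simp only [List.countP_cons, List.takeWhile_cons, h, decide_false]
      simp only [decide_false, List.length_nil, if_neg, Bool.false_eq_true, not_false_iff]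
      have : t.countP (fun x => decide (x ≤ pos)) = 0 :=
        List.countP_eq_zero.mpr fun x hx => by
          simpa using lt_of_lt_of_le (not_le.mp h) (ha x hx)
      simp [this, h]

lemma pvSorted_getElem_le (S : List Int) (pos : Int) (hS : S.Pairwise (· ≤ ·))
    (i : Nat) (hi : i < S.countP (fun x => decide (x ≤ pos))) (hl : i < S.length) :
    S[i] ≤ pos := by
  rw [pvCountP_takeWhile pos S hS] at hi
  have hpre := List.takeWhile_prefix (l := S) (fun x => decide (x ≤ pos))
  have := hpre.getElem (i := i) hi
  have hmem : (S.takeWhile (fun x => decide (x ≤ pos)))[i] ∈ S.takeWhile (fun x => decide (x ≤ pos)) :=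
    List.getElem_mem _
  have hp := List.mem_takeWhile_imp hmem
  rw [this] at hp
  simpa using hp

lemma pvSorted_getElem_gt (S : List Int) (pos : Int) (hS : S.Pairwise (· ≤ ·))
    (hl : S.countP (fun x => decide (x ≤ pos)) < S.length) :
    ¬ S[S.countP (fun x => decide (x ≤ pos))]'hl ≤ pos := by
  have h2 := pvCountP_takeWhile pos S hS
  have hsplit := (List.takeWhile_append_dropWhile (p := fun x => decide (x ≤ pos)) (l := S)).symm
  have hne : S.dropWhile (fun x => decide (x ≤ pos)) ≠ [] := by
    intro hnil
    have := congrArg List.length hsplit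
    simp [hnil] at this
    omega
  have hhead := List.head_dropWhile_not (fun x => decide (x ≤ pos)) hne
  have h3 := List.getElem_of_eq hsplit (i := S.countP (fun x => decide (x ≤ pos))) hl
  rw [List.getElem_append_right (by omega)] at h3
  rw [h3]
  have hz : S.countP (fun x => decide (x ≤ pos)) - (S.takeWhile (fun x => decide (x ≤ pos))).length = 0 := by omega
  simp only [hz]
  simpa [List.head_eq_getElem] using hhead

lemma pvWhileAdv_eq (S : List Int) (pos : Int) (hS : S.Pairwise (· ≤ ·)) (j : Nat)
    (hj : j ≤ S.countP (fun x => decide (x ≤ pos))) :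
    pvWhileAdv S pos j = S.countP (fun x => decide (x ≤ pos)) := by
  rw [pvWhileAdv]
  by_cases h : j < S.length
  · simp only [h, dif_pos]
    by_cases hb : S[j] ≤ pos
    · have hjlt : j < S.countP (fun x => decide (x ≤ pos)) := by
        rcases lt_or_eq_of_le hj with h' | h'
        · exact h'
        · exfalso
          have hg := pvSorted_getElem_gt S pos hS (h' ▸ h)
          apply hg
          simpa [← h'] using hb
      simp only [hb, if_pos]
      exact pvWhileAdv_eq S pos hS (j + 1) hjlt
    · have : ¬ j < S.countP (fun x => decide (x ≤ pos)) := fun hlt =>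
        hb (pvSorted_getElem_le S pos hS j hlt h)
      simp only [hb, if_neg, Bool.false_eq_true, not_false_iff]
      omega
  · have := List.countP_le_length (p := fun x => decide (x ≤ pos)) (l := S)
    simp only [h, dif_neg, not_false_iff]
    omega
termination_by S.length - j
decreasing_by omega

lemma pvG_step (p : Int) : ∀ (S : List Int),
    pvG S (p + 1) = pvG S p + 2 * (S.countP (fun x => decide (x ≤ p)) : Int) - (S.length : Int) := by
  intro S
  induction S with
  | nil => simp [pvG]
  | cons a t ih =>
    have ha : |a - (p + 1)| = |a - p| + (if a ≤ p then 1 else -1) := by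
      by_cases h : a ≤ p
      · rw [abs_of_nonpos (by omega), abs_of_nonpos (by omega)]
        simp only [h, if_pos]
        omega
      · rw [abs_of_nonneg (by omega), abs_of_nonneg (by omega)]
        simp only [h, if_neg, not_false_iff]
        omega
    simp only [pvG, List.map_cons, List.sum_cons, List.countP_cons, List.length_cons] at *
    by_cases h : a ≤ p
    · simp only [h, if_pos, decide_true] at ha ⊢
      push_cast
      omega
    · simp only [h, if_neg, not_false_iff, decide_false] at ha ⊢
      push_cast
      omega

lemma pvLoop (S : List Int) (hS : S.Pairwise (· ≤ ·)) (n : Int) (hn : n = (S.length : Int)) :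
    ∀ (m : Nat) (k : Int), 0 ≤ k → k + (m : Int) = n →
    ∀ (acc : PySem.Dict Int Int) (j : Nat),
      j ≤ S.countP (fun x => decide (x ≤ k)) →
      (∀ p : Int, k ≤ p → acc.contains p = false) →
      (((PySem.List.pyRange k n 1).foldl
        (fun st pos =>
          let j := pvWhileAdv S pos st.2.2
          (st.1.insert pos st.2.1, st.2.1 + (j : Int) - (n - (j : Int)), j))
        (acc, pvG S k, j)).1).items
        = acc.items ++ (PySem.List.pyRange k n 1).map (fun p => (p, pvG S p)) := by
  intro m
  induction m with
  | zero =>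
    intro k hk0 hkn acc j hj hacc
    rw [PySem.List.pyRange_one_eq_nil (by omega)]
    simp
  | succ m ih =>
    intro k hk0 hkn acc j hj hacc
    have hklt : k < n := by push_cast at hkn ⊢; omega
    rw [PySem.List.pyRange_one_cons hklt]
    simp only [List.foldl_cons, List.map_cons]
    have hadv : pvWhileAdv S k j = S.countP (fun x => decide (x ≤ k)) := pvWhileAdv_eq S k hS j hj
    have hcur : pvG S k + (pvWhileAdv S k j : Int) - (n - (pvWhileAdv S k j : Int)) = pvG S (k + 1) := by
      rw [hadv, pvG_step k S, hn]; ring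
    have hjle : pvWhileAdv S k j ≤ S.countP (fun x => decide (x ≤ k + 1)) := by
      rw [hadv]
      exact List.countP_mono_left fun x _ hx => by
        simp only [decide_eq_true_eq] at hx ⊢; omega
    have hacc' : ∀ p : Int, k + 1 ≤ p → (acc.insert k (pvG S k)).contains p = false := by
      intro p hp
      rw [PySem.Dict.contains_insert]
      have : (p == k) = false := by simp; omega
      rw [this, Bool.false_or]
      exact hacc p (by omega)
    have := ih (k + 1) (by omega) (by push_cast at hkn ⊢; omega)
      (acc.insert k (pvG S k)) (pvWhileAdv S k j) hjle hacc'
    rw [← hcur] at this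
    rw [this, PySem.Dict.items_insert_of_not_contains acc _ (hacc k le_rfl)]
    simp

-- ===== VERDICT (by name: the statement is the Claim_ definition above) =====
theorem calc_fuel_one_spec : Claim_equal_calc_fuel_one := by
  intro seq _ _
  unfold Spec_calc_fuel_one calc_fuel_one calc_fuel_one_alt
  simp only []
  have hS : (PySem.List.sorted seq (fun x => x) false).Pairwise (· ≤ ·) :=
    PySem.List.sorted_pairwise seq (fun x => x)
  have hperm : (PySem.List.sorted seq (fun x => x) false).Perm seq :=
    PySem.List.sorted_perm seq (fun x => x) false
  have hlen : (PySem.List.sorted seq (fun x => x) false).length = seq.length := hperm.length_eq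
  -- A side: the fresh-key insert loop appends all pairs in order
  rw [PySem.Dict.items_foldl_insert_fresh (PySem.List.pyRange 0 (seq.length : Int) 1)
      (fun pos => pos) (fun pos => seq.foldl (fun track_fuel i => track_fuel + |i - pos|) 0)
      PySem.Dict.empty (fun a _ => PySem.Dict.contains_empty a)
      (by simpa using PySem.List.nodup_pyRange_one 0 (seq.length : Int))]
  -- B side: rewrite cur0 to pvG S 0 and apply the sweep invariant
  have hcur0 : (PySem.List.sorted seq (fun x => x) false).foldl (fun cur x => cur + |x|) 0
      = pvG (PySem.List.sorted seq (fun x => x) false) 0 := by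
    rw [pvFoldl_abs0]; omega
  rw [hcur0]
  rw [pvLoop (PySem.List.sorted seq (fun x => x) false) hS (seq.length : Int) (by rw [hlen])
      seq.length 0 le_rfl (by omega) PySem.Dict.empty 0 (Nat.zero_le _)
      (fun p _ => PySem.Dict.contains_empty p)]
  simp only [PySem.Dict.empty, PySem.Dict.items, List.nil_append]
  apply List.map_congr_left
  intro pos _
  have h1 : seq.foldl (fun track_fuel i => track_fuel + |i - pos|) 0 = pvG seq pos := by
    rw [pvFoldl_abs]; omega
  have h2 : pvG seq pos = pvG (PySem.List.sorted seq (fun x => x) false) pos :=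
    ((hperm.map (fun x => |x - pos|)).sum_eq).symm
  rw [h1, h2]
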